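-- pv_equiv track=rewrite | github.com/GitMonsters/octotetrahedral-agi | arc-puzzle-catalog/re-arc/solves/22f13051/solver.py | transform
-- ===== SOURCE A (Python) =====
-- def transform(input_grid):
--     from collections import Counter
--
--     N = len(input_grid)
--
--     # Find background color (most common)
--     flat = [c for row in input_grid for c in row]
--     bg = Counter(flat).most_common(1)[0][0]
--
--     # Find bounding box of non-background cells
--     non_bg = [(r, c) for r in range(N) for c in range(N) if input_grid[r][c] != bg]
--
--     min_r = min(r for r, c in non_bg)
--     max_r = max(r for r, c in non_bg)
--     min_c = min(c for r, c in non_bg)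
--     max_c = max(c for r, c in non_bg)
--
--     # Determine flips to move pattern to bottom-right corner
--     flip_v = min_r == 0 and max_r != N - 1
--     flip_h = min_c == 0 and max_c != N - 1
--
--     grid = [row[:] for row in input_grid]
--     if flip_v:
--         grid = grid[::-1]
--     if flip_h:
--         grid = [row[::-1] for row in grid]
--
--     # Read main diagonal and extract repeating sequence
--     diag = [grid[i][i] for i in range(N)]
--     period = N // 2
--     seq = diag[period:]
--
--     # Generate 2N x 2N output
--     out_size = N * 2
--     output = [[0] * out_size for _ in range(out_size)]
--     for r in range(out_size):
--         for c in range(out_size):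
--             output[r][c] = seq[min(r, c) % period]
--
--     # Reverse flips
--     if flip_h:
--         output = [row[::-1] for row in output]
--     if flip_v:
--         output = output[::-1]
--
--     return output
-- ===== SOURCE B (Python) =====
-- def transform(input_grid):
--     from collections import Counter
--
--     N = len(input_grid)
--     bg = Counter(c for row in input_grid for c in row).most_common(1)[0][0]
--     period, size = N // 2, 2 * N
--
--     def has_fg(cells):
--         return any(v != bg for v in cells)
--
--     # Flip flags from the border rows/columns of the N x N region:
--     # min_r == 0 iff row 0 holds a non-background cell, max_r != N-1 iff row N-1 holds none.
--     flip_v = has_fg(input_grid[0][:N]) and not has_fg(input_grid[N - 1][:N])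
--     flip_h = has_fg([row[0] for row in input_grid]) and not has_fg([row[N - 1] for row in input_grid])
--
--     # Repeating sequence: lower half of the main diagonal of the (virtually) flipped grid.
--     seq = []
--     for i in range(period, N):
--         row = input_grid[N - 1 - i] if flip_v else input_grid[i]
--         seq.append(row[-1 - i] if flip_h else row[i])
--
--     # One diagonal ramp of length 2N; row r is ramp[:r+1] padded with ramp[r].
--     ramp = [seq[k % period] for k in range(size)]
--     rows = [ramp[:r + 1] + [ramp[r]] * (size - r - 1) for r in range(size)]
--     if flip_h:
--         rows = [row[::-1] for row in rows]
--     if flip_v: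
--         rows.reverse()
--     return rows
-- ===== Notes on version B (the rewrite author's own statement) =====
-- stated objective: faster
-- what changed: B drops the non-background coordinate list and the materialized grid flips (flip flags come from testing only the four border rows/columns, the diagonal is read with index arithmetic) and builds each output row by slicing one precomputed 2N-long diagonal ramp plus a replicate, instead of A's per-cell nested loop with min(r,c)%period.
import Mathlib
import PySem

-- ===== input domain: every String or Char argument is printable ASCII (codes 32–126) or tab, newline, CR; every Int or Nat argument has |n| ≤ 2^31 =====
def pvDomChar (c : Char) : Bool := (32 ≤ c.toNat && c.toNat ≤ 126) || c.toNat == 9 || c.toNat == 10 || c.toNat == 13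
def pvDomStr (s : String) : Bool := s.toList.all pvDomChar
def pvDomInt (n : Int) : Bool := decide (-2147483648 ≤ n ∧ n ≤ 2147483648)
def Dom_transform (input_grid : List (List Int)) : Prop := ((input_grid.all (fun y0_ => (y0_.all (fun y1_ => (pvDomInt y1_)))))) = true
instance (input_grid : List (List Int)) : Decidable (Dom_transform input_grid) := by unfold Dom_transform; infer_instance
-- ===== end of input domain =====

-- B is a faster same-complexity rewrite: border-only flip detection, index-arithmetic diagonal read,
-- and output rows built by slicing one precomputed diagonal ramp instead of A's per-cell nested loop.

-- shared by both ports (identical Python lines in A and B):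
-- Counter(flat).most_common(1)[0][0] = first key of maximal count (insertion order breaks ties)
def pvBg (xs : List Int) : Int :=
  match (PySem.Dict.counter xs).items with
  | [] => 0  -- Python raises IndexError here (empty grid); excluded by Pre_transform
  | p :: rest => (rest.foldl (fun best q => if best.2 < q.2 then q else best) p).1

-- input_grid[r][c]; in range on every input admitted by Pre_transform (r,c < N ≤ row lengths)
def pvCell (g : List (List Int)) (r c : Nat) : Int := (g.getD r []).getD c 0

-- ===== PORT A =====
def pvNonBg (g : List (List Int)) : List (Nat × Nat) :=
  (List.range g.length).flatMap (fun r =>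
    ((List.range g.length).filter (fun c => pvCell g r c != pvBg (g.flatMap id))).map (fun c => (r, c)))

-- min(gen) / max(gen); the Python raises ValueError on an empty generator — excluded by Pre_transform
def pvMinA (l : List Nat) : Nat := (PySem.List.min? l (fun y => y)).getD 0
def pvMaxA (l : List Nat) : Nat := (PySem.List.max? l (fun y => y)).getD 0

def pvFlipVA (g : List (List Int)) : Bool :=
  (pvMinA ((pvNonBg g).map (·.1)) == 0) && (pvMaxA ((pvNonBg g).map (·.1)) != g.length - 1)
def pvFlipHA (g : List (List Int)) : Bool :=
  (pvMinA ((pvNonBg g).map (·.2)) == 0) && (pvMaxA ((pvNonBg g).map (·.2)) != g.length - 1)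

def pvGridA (g : List (List Int)) : List (List Int) :=
  let grid := if pvFlipVA g then g.reverse else g   -- grid[::-1]
  if pvFlipHA g then grid.map List.reverse else grid  -- [row[::-1] for row in grid]

def pvSeqA (g : List (List Int)) : List Int :=
  ((List.range g.length).map (fun i => pvCell (pvGridA g) i i)).drop (g.length / 2)

def transform (input_grid : List (List Int)) : List (List Int) :=
  let period := input_grid.length / 2
  let seq := pvSeqA input_grid
  let out_size := input_grid.length * 2
  -- seq[min(r,c) % period]; in range under Pre_transform (period ≥ 1, seq.length ≥ period)
  let output := (List.range out_size).map (fun r =>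
    (List.range out_size).map (fun c => seq.getD (min r c % period) 0))
  let output := if pvFlipHA input_grid then output.map List.reverse else output
  if pvFlipVA input_grid then output.reverse else output

-- ===== PORT B =====
def pvHasFg (bg : Int) (cells : List Int) : Bool := cells.any (fun v => v != bg)

def pvFlipVB (g : List (List Int)) : Bool :=
  pvHasFg (pvBg (g.flatMap id)) ((g.getD 0 []).take g.length) &&
    !(pvHasFg (pvBg (g.flatMap id)) ((g.getD (g.length - 1) []).take g.length))
def pvFlipHB (g : List (List Int)) : Bool :=
  pvHasFg (pvBg (g.flatMap id)) (g.map (fun row => row.getD 0 0)) &&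
    !(pvHasFg (pvBg (g.flatMap id)) (g.map (fun row => row.getD (g.length - 1) 0)))

def pvSeqB (g : List (List Int)) : List Int :=
  (List.range' (g.length / 2) (g.length - g.length / 2)).map (fun i =>
    let row := if pvFlipVB g then g.getD (g.length - 1 - i) [] else g.getD i []
    -- row[-1 - i] is a Python negative index: port with pyGet?
    if pvFlipHB g then (PySem.List.pyGet? row (-1 - (i : Int))).getD 0 else row.getD i 0)

def transform_alt (input_grid : List (List Int)) : List (List Int) :=
  let period := input_grid.length / 2
  let size := input_grid.length * 2
  let seq := pvSeqB input_grid
  let ramp := (List.range size).map (fun k => seq.getD (k % period) 0)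
  let rows := (List.range size).map (fun r =>
    ramp.take (r + 1) ++ List.replicate (size - r - 1) (ramp.getD r 0))
  let rows := if pvFlipHB input_grid then rows.map List.reverse else rows
  if pvFlipVB input_grid then rows.reverse else rows

-- ===== PRECONDITION & SPEC =====
-- Pre_transform is exactly where the Python A returns: N ≥ 2 (N ≤ 1 gives IndexError on the empty
-- grid or ZeroDivisionError from % period), every row at least N long (shorter rows give IndexError),
-- and some cell of the N×N region differs from the background (else min() raises ValueError).
def Pre_transform (input_grid : List (List Int)) : Prop :=
  2 ≤ input_grid.length ∧ (∀ row ∈ input_grid, input_grid.length ≤ row.length) ∧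
  ∃ r ∈ List.range input_grid.length, ∃ c ∈ List.range input_grid.length,
    pvCell input_grid r c ≠ pvBg (input_grid.flatMap id)
instance (input_grid : List (List Int)) : Decidable (Pre_transform input_grid) := by
  unfold Pre_transform; infer_instance

def pvWitness_transform : List (List Int) := [[1, 2], [2, 2]]

def Spec_transform (input_grid : List (List Int)) (out : List (List Int)) : Prop := out = transform_alt input_grid
instance (input_grid : List (List Int)) (out : List (List Int)) : Decidable (Spec_transform input_grid out) := by unfold Spec_transform; infer_instance

-- ===== CLAIM (what is proved, stated in full; the proofs are below) =====
def Claim_equal_transform : Prop := ∀ (input_grid : List (List Int)), Dom_transform input_grid → Pre_transform input_grid → Spec_transform input_grid (transform input_grid)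

-- ===== LEMMAS AND PROOFS =====

theorem mem_pvNonBg (g : List (List Int)) (r c : Nat) :
    (r, c) ∈ pvNonBg g ↔ r < g.length ∧ c < g.length ∧ pvCell g r c ≠ pvBg (g.flatMap id) := by
  simp [pvNonBg, List.mem_flatMap, List.mem_filter, List.mem_range]

theorem pvMinA_eq_zero_iff (l : List Nat) (h : l ≠ []) : pvMinA l = 0 ↔ 0 ∈ l := by
  obtain ⟨m, hm⟩ := Option.ne_none_iff_exists'.mp (fun hn => h ((PySem.List.min?_eq_none_iff l (fun y => y)).mp hn))
  unfold pvMinA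
  rw [show PySem.List.min? l (fun y => y) = some m from hm]
  simp only [Option.getD_some]
  constructor
  · rintro rfl; exact PySem.List.min?_mem hm
  · intro h0
    have := PySem.List.min?_isMin hm 0 h0
    omega

theorem pvMaxA_eq_iff (l : List Nat) (h : l ≠ []) (b : Nat) (hub : ∀ x ∈ l, x ≤ b) :
    pvMaxA l = b ↔ b ∈ l := by
  obtain ⟨m, hm⟩ := Option.ne_none_iff_exists'.mp (fun hn => h ((PySem.List.max?_eq_none_iff l (fun y => y)).mp hn))
  unfold pvMaxA
  rw [show PySem.List.max? l (fun y => y) = some m from hm]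
  simp only [Option.getD_some]
  constructor
  · rintro rfl; exact PySem.List.max?_mem hm
  · intro hb
    have h1 := PySem.List.max?_isMax hm b hb
    have h2 := hub m (PySem.List.max?_mem hm)
    omega

theorem mem_fst_pvNonBg (g : List (List Int)) (r : Nat) :
    r ∈ (pvNonBg g).map (·.1) ↔ r < g.length ∧ ∃ c < g.length, pvCell g r c ≠ pvBg (g.flatMap id) := by
  simp only [List.mem_map]
  constructor
  · rintro ⟨⟨a, b⟩, hm, rfl⟩
    have := (mem_pvNonBg g a b).mp hm
    exact ⟨this.1, b, this.2.1, this.2.2⟩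
  · rintro ⟨hr, c, hc, hne⟩
    exact ⟨(r, c), (mem_pvNonBg g r c).mpr ⟨hr, hc, hne⟩, rfl⟩

theorem mem_snd_pvNonBg (g : List (List Int)) (c : Nat) :
    c ∈ (pvNonBg g).map (·.2) ↔ c < g.length ∧ ∃ r < g.length, pvCell g r c ≠ pvBg (g.flatMap id) := by
  simp only [List.mem_map]
  constructor
  · rintro ⟨⟨a, b⟩, hm, rfl⟩
    have := (mem_pvNonBg g a b).mp hm
    exact ⟨this.2.1, a, this.1, this.2.2⟩
  · rintro ⟨hc, r, hr, hne⟩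
    exact ⟨(r, c), (mem_pvNonBg g r c).mpr ⟨hr, hc, hne⟩, rfl⟩

theorem hasFg_take (bg : Int) (row : List Int) (N : Nat) (hlen : N ≤ row.length) :
    pvHasFg bg (row.take N) = true ↔ ∃ c < N, row.getD c 0 ≠ bg := by
  simp only [pvHasFg, List.any_eq_true, bne_iff_ne, ne_eq]
  constructor
  · rintro ⟨v, hv, hne⟩
    obtain ⟨i, hi, rfl⟩ := List.mem_iff_getElem.mp hv
    refine ⟨i, ?_, ?_⟩
    · simpa using hi.trans_le (by simp)
    · rw [List.getD_eq_getElem row 0 (by simp at hi; omega)]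
      simpa [List.getElem_take] using hne
  · rintro ⟨c, hc, hne⟩
    refine ⟨row[c]'(by omega), ?_, ?_⟩
    · exact List.mem_iff_getElem.mpr ⟨c, by simp; omega, by simp [List.getElem_take]⟩
    · rwa [List.getD_eq_getElem row 0 (by omega)] at hne

theorem hasFg_col (bg : Int) (g : List (List Int)) (j : Nat) :
    pvHasFg bg (g.map (fun row => row.getD j 0)) = true ↔ ∃ r < g.length, pvCell g r j ≠ bg := by
  simp only [pvHasFg, List.any_eq_true, bne_iff_ne, ne_eq, List.mem_map]
  constructor
  · rintro ⟨v, ⟨row, hrow, rfl⟩, hne⟩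
    obtain ⟨i, hi, rfl⟩ := List.mem_iff_getElem.mp hrow
    exact ⟨i, hi, by rwa [pvCell, List.getD_eq_getElem g [] hi]⟩
  · rintro ⟨r, hr, hne⟩
    exact ⟨(g.getD r []).getD j 0, ⟨g.getD r [], by rw [List.getD_eq_getElem g [] hr]; exact List.getElem_mem hr, rfl⟩, hne⟩

theorem pvNonBg_ne_nil (g : List (List Int)) (h : Pre_transform g) : pvNonBg g ≠ [] := by
  obtain ⟨hN, hrows, r0, hr0, c0, hc0, hne⟩ := h
  simp only [List.mem_range] at hr0 hc0
  exact List.ne_nil_of_mem ((mem_pvNonBg g r0 c0).mpr ⟨hr0, hc0, hne⟩)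

theorem getD_mem (g : List (List Int)) (r : Nat) (hr : r < g.length) : g.getD r [] ∈ g := by
  rw [List.getD_eq_getElem g [] hr]; exact List.getElem_mem hr

theorem flipV_eq (g : List (List Int)) (h : Pre_transform g) : pvFlipVA g = pvFlipVB g := by
  obtain ⟨hN, hrows, -⟩ := id h
  have hnb := pvNonBg_ne_nil g h
  have hrs : (pvNonBg g).map (·.1) ≠ [] := by simpa using hnb
  have hub : ∀ x ∈ (pvNonBg g).map (·.1), x ≤ g.length - 1 := fun x hx => by
    have := ((mem_fst_pvNonBg g x).mp hx).1; omega
  rw [Bool.eq_iff_iff]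
  simp only [pvFlipVA, pvFlipVB, Bool.and_eq_true, beq_iff_eq, bne_iff_ne, ne_eq,
    Bool.not_eq_eq_eq_not, Bool.not_true]
  rw [pvMinA_eq_zero_iff _ hrs, pvMaxA_eq_iff _ hrs _ hub, mem_fst_pvNonBg, mem_fst_pvNonBg,
    ← Bool.not_eq_true (pvHasFg _ _),
    hasFg_take _ _ _ (hrows _ (getD_mem g 0 (by omega))),
    hasFg_take _ _ _ (hrows _ (getD_mem g (g.length - 1) (by omega)))]
  constructor
  · rintro ⟨⟨-, h0⟩, hlast⟩
    exact ⟨h0, fun hx => hlast ⟨by omega, hx⟩⟩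
  · rintro ⟨h0, hlast⟩
    exact ⟨⟨by omega, h0⟩, fun hx => hlast hx.2⟩

theorem flipH_eq (g : List (List Int)) (h : Pre_transform g) : pvFlipHA g = pvFlipHB g := by
  obtain ⟨hN, hrows, -⟩ := id h
  have hnb := pvNonBg_ne_nil g h
  have hcs : (pvNonBg g).map (·.2) ≠ [] := by simpa using hnb
  have hub : ∀ x ∈ (pvNonBg g).map (·.2), x ≤ g.length - 1 := fun x hx => by
    have := ((mem_snd_pvNonBg g x).mp hx).1; omega
  rw [Bool.eq_iff_iff]
  simp only [pvFlipHA, pvFlipHB, Bool.and_eq_true, beq_iff_eq, bne_iff_ne, ne_eq,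
    Bool.not_eq_eq_eq_not, Bool.not_true]
  rw [pvMinA_eq_zero_iff _ hcs, pvMaxA_eq_iff _ hcs _ hub, mem_snd_pvNonBg, mem_snd_pvNonBg,
    ← Bool.not_eq_true (pvHasFg _ _), hasFg_col, hasFg_col]
  constructor
  · rintro ⟨⟨-, h0⟩, hlast⟩
    exact ⟨h0, fun hx => hlast ⟨by omega, hx⟩⟩
  · rintro ⟨h0, hlast⟩
    exact ⟨⟨by omega, h0⟩, fun hx => hlast hx.2⟩

theorem getD_reverse {α : Type} (l : List α) (d : α) (i : Nat) (h : i < l.length) :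
    l.reverse.getD i d = l.getD (l.length - 1 - i) d := by
  rw [List.getD_eq_getElem _ d (by simpa using h), List.getD_eq_getElem _ d (by omega),
    List.getElem_reverse]

theorem pyGet_neg_getD (row : List Int) (i : Nat) (h : i < row.length) :
    (PySem.List.pyGet? row (-1 - (i : Int))).getD 0 = row.getD (row.length - 1 - i) 0 := by
  have : (-1 - (i : Int)) = -((i + 1 : Nat) : Int) := by push_cast; ring
  rw [this, PySem.List.pyGet?_neg_natCast row (i + 1) (by omega) (by omega)]
  rw [List.getElem?_eq_getElem (by omega), List.getD_eq_getElem _ _ (by omega)]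
  simp only [Option.getD_some]
  congr 1
  omega

theorem seq_eq (g : List (List Int)) (h : Pre_transform g) : pvSeqA g = pvSeqB g := by
  obtain ⟨hN, hrows, -⟩ := id h
  unfold pvSeqA pvSeqB
  rw [← List.map_drop, show (List.range g.length).drop (g.length / 2)
      = List.range' (g.length / 2) (g.length - g.length / 2) by simp [List.range_eq_range']]
  apply List.map_congr_left
  intro i hi
  rw [List.mem_range'] at hi
  obtain ⟨k, hk, rfl⟩ := hi
  set i := g.length / 2 + 1 * k with hidef
  have hiN : i < g.length := by omega
  simp only
  unfold pvGridA
  rw [flipV_eq g h, flipH_eq g h]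
  have hrowmem : (if pvFlipVB g then g.getD (g.length - 1 - i) [] else g.getD i []) ∈ g := by
    split <;> exact getD_mem g _ (by omega)
  have hrowlen : i < (if pvFlipVB g then g.getD (g.length - 1 - i) [] else g.getD i []).length :=
    lt_of_lt_of_le hiN (hrows _ hrowmem)
  cases hfv : pvFlipVB g <;> cases hfh : pvFlipHB g <;>
    simp only [hfv, hfh, Bool.false_eq_true, pvCell, ↓reduceIte] at hrowlen hrowmem ⊢
  · have hm : (g.map List.reverse).getD i [] = (g.getD i []).reverse := by
      rw [List.getD_eq_getElem _ _ (by simpa using hiN), List.getElem_map,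
        List.getD_eq_getElem _ _ hiN]
    rw [hm, getD_reverse _ 0 i hrowlen, pyGet_neg_getD _ i hrowlen]
  · rw [getD_reverse g [] i hiN]
  · have hm : (g.reverse.map List.reverse).getD i [] = (g.reverse.getD i []).reverse := by
      rw [List.getD_eq_getElem _ _ (by simpa using hiN), List.getElem_map,
        List.getD_eq_getElem _ _ (by simpa using hiN)]
    rw [hm, getD_reverse g [] i hiN, getD_reverse _ 0 i hrowlen, pyGet_neg_getD _ i hrowlen]

theorem row_eq (seq : List Int) (p M r : Nat) (hr : r < M) :
    (List.range M).map (fun c => seq.getD (min r c % p) 0)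
      = ((List.range M).map (fun k => seq.getD (k % p) 0)).take (r + 1)
        ++ List.replicate (M - r - 1) (((List.range M).map (fun k => seq.getD (k % p) 0)).getD r 0) := by
  apply List.ext_getElem
  · simp; omega
  · intro i h1 h2
    simp only [List.getElem_map, List.getElem_range]
    by_cases hi : i < r + 1
    · rw [List.getElem_append_left (by simp; omega)]
      simp only [List.getElem_take, List.getElem_map, List.getElem_range]
      congr 2
      omega
    · rw [List.getElem_append_right (by simp; omega)]
      simp only [List.getElem_replicate]
      rw [List.getD_eq_getElem ((List.range M).map (fun k => seq.getD (k % p) 0)) 0 (by simpa using hr)]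
      simp only [List.getElem_map, List.getElem_range]
      congr 2
      omega

-- ===== VERDICT (by name: the statement is the Claim_ definition above) =====
theorem transform_spec : Claim_equal_transform := by
  intro g _ hpre
  unfold Spec_transform transform transform_alt
  dsimp only
  rw [flipV_eq g hpre, flipH_eq g hpre, seq_eq g hpre,
      List.map_congr_left (fun r hr => row_eq (pvSeqB g) (g.length / 2) (g.length * 2) r (List.mem_range.mp hr))]
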